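-- pv_equiv track=rewrite | github.com/akashdeep3194/Scaler | z/w3d5_3.py | solve
-- ===== SOURCE A (Python) =====
-- def solve(A):
--     maxn = minn = A[0]
--     for ele in A:
--         if ele>maxn:
--             maxn = ele
--         elif ele<minn:
--             minn = ele
--     minn = min(A)
--     maxn = max(A)
--     cnt = 0
--     for ele in A:
--         if ele != minn and ele != maxn:
--             cnt += 1
--     return cnt
-- ===== SOURCE B (Python) =====
-- def solve(A):
--     s = sorted(A)
--     mn, mx = s[0], s[-1]
--     if mn == mx:
--         return 0
--     t = s
--     while t and t[0] == mn:
--         t = t[1:]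
--     t = t[::-1]
--     while t and t[0] == mx:
--         t = t[1:]
--     return len(t)
-- ===== Notes on version B (the rewrite author's own statement) =====
-- stated objective: alternative
-- what changed: B sorts the list and trims the contiguous run of the minimum from the front and the run of the maximum from the back (via reverse), returning the length of what remains, instead of A's per-element counting scan.
import Mathlib
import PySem

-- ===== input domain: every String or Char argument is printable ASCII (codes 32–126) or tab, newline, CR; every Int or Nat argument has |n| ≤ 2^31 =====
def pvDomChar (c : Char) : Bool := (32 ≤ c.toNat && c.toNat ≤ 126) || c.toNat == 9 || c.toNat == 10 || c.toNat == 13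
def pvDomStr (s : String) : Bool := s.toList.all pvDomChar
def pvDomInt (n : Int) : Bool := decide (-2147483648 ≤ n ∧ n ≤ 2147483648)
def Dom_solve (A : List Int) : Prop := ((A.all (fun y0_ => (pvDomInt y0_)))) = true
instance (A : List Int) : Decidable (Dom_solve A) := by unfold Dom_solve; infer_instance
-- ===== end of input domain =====

-- B sorts and trims the min-run from the front and the max-run from the back instead of A's counting scan (alternative algorithm); return value only.

-- ===== PORT A =====
def solve (A : List Int) : Int :=
  match PySem.List.pyGet? A 0 with
  | none => 0  -- unreachable under Pre_solve: A[0] raises IndexError on []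
  | some a0 =>
    -- first loop: running max/min (its result is immediately overwritten by min(A)/max(A))
    let _mm : Int × Int := A.foldl
      (fun p ele => if ele > p.1 then (ele, p.2) else if ele < p.2 then (p.1, ele) else p)
      (a0, a0)
    match PySem.List.min? A (fun x => x), PySem.List.max? A (fun x => x) with
    | some minn, some maxn =>
        A.foldl (fun cnt ele => if ele ≠ minn ∧ ele ≠ maxn then cnt + 1 else cnt) 0
    | _, _ => 0  -- unreachable: A nonempty here

-- ===== PORT B =====
-- 'while t and t[0] == v: t = t[1:]'
def dropRun (v : Int) : List Int → List Int
  | [] => []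
  | x :: r => if x = v then dropRun v r else x :: r

def solve_alt (A : List Int) : Int :=
  let s := PySem.List.sorted A (fun x => x)
  match PySem.List.pyGet? s 0 with
  | none => 0  -- unreachable under Pre_solve: s[0] raises IndexError only on []
  | some mn =>
    match PySem.List.pyGet? s (-1) with
    | none => 0  -- unreachable likewise
    | some mx =>
      if mn = mx then 0
      else
        let t := dropRun mn s
        let t := dropRun mx t.reverse   -- t[::-1] then trim the run of mx (PySem.List.slice?_none_none_neg_one)
        (t.length : Int)

-- ===== PRECONDITION & SPEC =====
-- Pre_ excludes only the empty list, on which both A and B raise IndexError.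
def Pre_solve (A : List Int) : Prop := A ≠ []
instance (A : List Int) : Decidable (Pre_solve A) := by unfold Pre_solve; infer_instance
def pvWitness_solve : List Int := [1, 2, 2, 3]

def Spec_solve (A : List Int) (out : Int) : Prop := out = solve_alt A
instance (A : List Int) (out : Int) : Decidable (Spec_solve A out) := by unfold Spec_solve; infer_instance

-- ===== CLAIM (what is proved, stated in full; the proofs are below) =====
def Claim_equal_solve : Prop := ∀ (A : List Int), Dom_solve A → Pre_solve A → Spec_solve A (solve A)

-- ===== LEMMAS AND PROOFS =====

theorem count_loop_eq_countP (A : List Int) (mn mx : Int) :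
    A.foldl (fun cnt ele => if ele ≠ mn ∧ ele ≠ mx then cnt + 1 else cnt) 0
      = (A.countP (fun ele => ele ≠ mn ∧ ele ≠ mx) : Int) := by
  simpa using PySem.List.foldl_ite_add_one (p := fun ele => ele ≠ mn ∧ ele ≠ mx) (l := A) (a := 0)

-- once a non-v element has been seen, v never reappears ⇒ dropRun = filter (· ≠ v)
theorem dropRun_eq_filter (v : Int) (s : List Int)
    (h : s.Pairwise (fun a b => a = v ∨ b ≠ v)) :
    dropRun v s = s.filter (fun x => x ≠ v) := by
  induction s with
  | nil => rfl
  | cons x r ih =>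
    rcases List.pairwise_cons.mp h with ⟨hx, hr⟩
    by_cases hxv : x = v
    · subst hxv
      simp [dropRun, ih hr]
    · have hall : ∀ b ∈ r, b ≠ v := fun b hb => (hx b hb).resolve_left hxv
      rw [dropRun, if_neg hxv]
      rw [List.filter_cons_of_pos (by simpa using hxv)]
      rw [List.filter_eq_self.mpr (by intro b hb; simpa using hall b hb)]

theorem filter_length_int (s : List Int) (p : Int → Bool) :
    ((s.filter p).length : Int) = (s.countP p : Int) := by
  simp [List.countP_eq_length_filter]

-- ===== VERDICT (by name: the statement is the Claim_ definition above) =====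
theorem solve_spec : Claim_equal_solve := by
  intro A _ hpre
  unfold Spec_solve solve solve_alt
  obtain ⟨a0, t0, rfl⟩ := List.exists_cons_of_ne_nil hpre
  have hget : PySem.List.pyGet? (a0 :: t0) 0 = some a0 := PySem.List.pyGet?_zero_cons a0 t0
  have hmn : PySem.List.min? (a0 :: t0) (fun x => x) = some (t0.foldl min a0) :=
    PySem.List.min?_id_cons a0 t0
  have hmx : PySem.List.max? (a0 :: t0) (fun x => x) = some (t0.foldl max a0) :=
    PySem.List.max?_id_cons a0 t0
  set mn := t0.foldl min a0 with hmndef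
  set mx := t0.foldl max a0 with hmxdef
  have hminle : ∀ y ∈ (a0 :: t0), mn ≤ y := fun y hy => PySem.List.min?_isMin hmn y hy
  have hmaxge : ∀ y ∈ (a0 :: t0), y ≤ mx := fun y hy => PySem.List.max?_isMax hmx y hy
  have hmnmem : mn ∈ (a0 :: t0) := PySem.List.min?_mem hmn
  have hmxmem : mx ∈ (a0 :: t0) := PySem.List.max?_mem hmx
  rw [hget, hmn, hmx]
  simp only
  set s := PySem.List.sorted (a0 :: t0) (fun x => x) with hsdef
  have hperm : s.Perm (a0 :: t0) := PySem.List.sorted_perm (a0 :: t0) (fun x => x) false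
  have hsne : s ≠ [] := by
    rw [hsdef, Ne, PySem.List.sorted_eq_nil_iff]
    simp
  obtain ⟨m, st, hs⟩ := List.exists_cons_of_ne_nil hsne
  have hpw : s.Pairwise (· ≤ ·) := by
    have := PySem.List.sorted_pairwise (xs := a0 :: t0) (key := fun x => x)
    simpa using this
  -- head of s is mn
  have hm_eq : m = mn := by
    have hss : PySem.List.sorted (a0 :: t0) (fun x => x) = m :: st := by
      rw [← hsdef]; exact hs
    have h1 : ∀ y ∈ (a0 :: t0), m ≤ y := by
      have := PySem.List.key_head_sorted_le _ _ hss
      simpa using this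
    have hmem_m : m ∈ (a0 :: t0) := hperm.subset (hs ▸ List.mem_cons_self)
    exact le_antisymm (h1 mn hmnmem) (hminle m hmem_m)
  have hget0s : PySem.List.pyGet? s 0 = some mn := by
    rw [hs, PySem.List.pyGet?_zero_cons, hm_eq]
  -- last of s is mx
  have hg_eq : s.getLast hsne = mx := by
    have hg_mem : s.getLast hsne ∈ s := List.getLast_mem hsne
    have hle : s.getLast hsne ≤ mx := hmaxge _ (hperm.subset hg_mem)
    have hge : mx ≤ s.getLast hsne := by
      have hmxs : mx ∈ s := hperm.mem_iff.mpr hmxmem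
      obtain ⟨i, hi, hie⟩ := List.mem_iff_getElem.mp hmxs
      have hlast_el : s.getLast hsne = s[s.length - 1] := List.getLast_eq_getElem hsne
      have hmono : s[i] ≤ s[s.length - 1] := by
        have := PySem.List.sorted_id_getElem_mono (xs := a0 :: t0)
          (p := i) (q := s.length - 1) (by omega) (by rw [← hsdef]; omega)
        simpa [← hsdef] using this
      rw [hlast_el, ← hie]
      exact hmono
    exact le_antisymm hle hge
  have hgetl : PySem.List.pyGet? s (-1) = some mx := by
    rw [PySem.List.pyGet?_neg_one, List.getLast?_eq_some_getLast hsne, hg_eq]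
  rw [hget0s, hgetl]
  simp only
  rw [count_loop_eq_countP]
  by_cases hmm : mn = mx
  · rw [if_pos hmm]
    have hz : (a0 :: t0).countP (fun ele => ele ≠ mn ∧ ele ≠ mx) = 0 := by
      rw [List.countP_eq_zero]
      intro a ha
      have h1 := hminle a ha
      have h2 := hmaxge a ha
      simp only [decide_eq_true_eq, not_and, ne_eq, Decidable.not_not]
      intro h3
      omega
    rw [hz]; rfl
  · rw [if_neg hmm]
    -- trim the min-run
    have h1 : s.Pairwise (fun a b => a = mn ∨ b ≠ mn) := by
      refine List.Pairwise.imp_of_mem ?_ hpw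
      intro a b ha hb hab
      by_cases hamn : a = mn
      · exact Or.inl hamn
      · refine Or.inr fun hbmn => hamn ?_
        have := hminle a (hperm.subset ha)
        omega
    rw [dropRun_eq_filter mn s h1]
    set t1 := s.filter (fun x => x ≠ mn) with ht1
    have hpw1 : t1.Pairwise (· ≤ ·) := hpw.sublist List.filter_sublist
    have h2 : t1.reverse.Pairwise (fun a b => a = mx ∨ b ≠ mx) := by
      have hpwr : t1.reverse.Pairwise (fun a b => b ≤ a) := List.pairwise_reverse.mpr hpw1
      refine List.Pairwise.imp_of_mem ?_ hpwr
      intro a b ha hb hba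
      by_cases hamx : a = mx
      · exact Or.inl hamx
      · refine Or.inr fun hbmx => hamx ?_
        have has : a ∈ s := List.mem_of_mem_filter (ht1 ▸ List.mem_reverse.mp ha)
        have := hmaxge a (hperm.subset has)
        omega
    rw [dropRun_eq_filter mx _ h2]
    rw [← List.filter_reverse, List.filter_filter]
    rw [filter_length_int]
    congr 1
    have hpermr : s.reverse.Perm (a0 :: t0) := (List.reverse_perm s).trans hperm
    rw [← hpermr.countP_eq]
    apply List.countP_congr
    intro a _
    simp only [ne_eq, decide_not, decide_eq_true_eq, Bool.not_eq_true',
      Bool.and_eq_true, decide_eq_false_iff_not]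
    tauto
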